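-- pv_equiv track=rewrite | github.com/AndyDAvies86/advent_of_code | 2016/2016Day09/2016day9.py | setupcount
-- ===== SOURCE A (Python) =====
-- import copy
--
-- def setupcount(inputstring):
--     checker = copy.deepcopy(inputstring)
--     countlist = [1 for x in inputstring]
--     while "(" in checker:
--         start = checker.index("(")
--         end = checker.index(")")
--         for i in range(start,end+1):
--             countlist[i] = 0
--             checker = checker[0:start]+"X"*(end-start+1)+checker[end+1:]
--     return countlist
-- ===== SOURCE B (Python) =====
-- def setupcount(inputstring):
--     countlist = []
--     inside = False
--     for ch in inputstring:
--         if inside: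
--             countlist.append(0)
--             if ch == ')':
--                 inside = False
--         elif ch == '(':
--             countlist.append(0)
--             inside = True
--         else:
--             countlist.append(1)
--     return countlist
-- ===== Notes on version B (the rewrite author's own statement) =====
-- stated objective: faster
-- what changed: Replaces the while-loop that repeatedly re-scans the whole string for the first '(' and ')' and rebuilds a masked copy with a single linear scan carrying an inside-parentheses flag.
-- outside the precondition, e.g. on setupcount('('): A raises ValueError, B returns [0]; on setupcount(')('): A does not finish within the time limit, B returns [1, 0]
import Mathlib
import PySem

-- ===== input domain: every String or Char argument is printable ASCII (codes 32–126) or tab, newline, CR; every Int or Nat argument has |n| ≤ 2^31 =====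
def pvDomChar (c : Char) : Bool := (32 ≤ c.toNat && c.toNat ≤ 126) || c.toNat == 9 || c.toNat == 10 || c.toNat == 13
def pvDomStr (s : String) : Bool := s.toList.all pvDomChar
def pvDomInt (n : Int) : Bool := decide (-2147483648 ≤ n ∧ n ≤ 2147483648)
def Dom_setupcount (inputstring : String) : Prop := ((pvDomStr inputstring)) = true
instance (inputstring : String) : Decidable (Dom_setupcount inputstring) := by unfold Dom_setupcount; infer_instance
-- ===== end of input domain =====

-- B replaces A's repeated whole-string re-scan and masking with one linear scan carrying an
-- inside-parentheses flag (objective: faster).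

-- ===== PORT A =====
-- the while-loop of A; fuel bounds the number of iterations (each productive iteration removes a
-- '(', so length+1 fuel is never exhausted on inputs where A returns).  The inner for-loop over
-- range(start, end+1) sets countlist[i] = 0 and reassigns checker to
-- checker[0:start] + "X"*(end-start+1) + checker[end+1:]  on each iteration (these slices with
-- non-negative in-range bounds are exactly take/replicate/drop); when the range is empty the body
-- never runs and checker stays unchanged, as in Python.
def aLoop : Nat → List Char → List Int → List Int
  | 0, _, countlist => countlist
  | fuel+1, checker, countlist =>
    if checker.contains '(' then
      match PySem.List.index? checker '(', PySem.List.index? checker ')' with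
      | some istart, some iend =>
        let p := (List.range' istart (iend + 1 - istart)).foldl
          (fun (p : List Int × List Char) _i =>
            (p.1.set _i 0,
             p.2.take istart ++ List.replicate (iend + 1 - istart) 'X' ++ p.2.drop (iend + 1)))
          (countlist, checker)
        aLoop fuel p.2 p.1
      | _, _ => countlist   -- checker.index(')') raises ValueError here: excluded by Pre_
    else countlist

def setupcount (inputstring : String) : List Int :=
  aLoop (inputstring.toList.length + 1) inputstring.toList
    (inputstring.toList.map (fun _ => (1 : Int)))

-- ===== PORT B =====
def altGo : List Char → Bool → List Int
  | [], _ => []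
  | c :: rest, inside =>
    if inside then 0 :: altGo rest (if c = ')' then false else true)
    else if c = '(' then 0 :: altGo rest true
    else 1 :: altGo rest false

def setupcount_alt (inputstring : String) : List Int := altGo inputstring.toList false

-- ===== PRECONDITION & SPEC =====
-- Classifies A's control flow by a single left-to-right scan of the input (no simulation of A's
-- masking loop): 0 = A returns, 1 = A raises ValueError (a '(' with no ')' after it during the
-- left-to-right pairing), 2 = A loops forever (a ')' outside any masked region with a '(' after it).
def aClassify : List Char → Bool → Nat
  | [], inside => if inside then 1 else 0
  | c :: rest, true => if c = ')' then aClassify rest false else aClassify rest true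
  | c :: rest, false =>
    if c = '(' then aClassify rest true
    else if c = ')' then (if rest.contains '(' then 2 else 0)
    else aClassify rest false

-- Pre_ excludes exactly the inputs on which A raises ValueError or loops forever; A returns a value
-- on every other input.
def Pre_setupcount (inputstring : String) : Prop := aClassify inputstring.toList false = 0
instance (inputstring : String) : Decidable (Pre_setupcount inputstring) := by
  unfold Pre_setupcount; infer_instance

def pvWitness_setupcount : String := "a(b)c"

def Spec_setupcount (inputstring : String) (out : List Int) : Prop := out = setupcount_alt inputstring
instance (inputstring : String) (out : List Int) : Decidable (Spec_setupcount inputstring out) := by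
  unfold Spec_setupcount; infer_instance

-- ===== CLAIM (what is proved, stated in full; the proofs are below) =====
def Claim_equal_setupcount : Prop := ∀ (inputstring : String), Dom_setupcount inputstring →
  Pre_setupcount inputstring → Spec_setupcount inputstring (setupcount inputstring)

-- ===== LEMMAS AND PROOFS =====

-- maskGo cs L inside: B's scan over cs, but emitting the corresponding entry of L where the scan
-- emits 1; altGo cs b is maskGo over the all-ones list.
def maskGo : List Char → List Int → Bool → List Int
  | [], L, _ => L
  | _ :: _, [], _ => []
  | c :: cs, _ :: L, true => 0 :: maskGo cs L (if c = ')' then false else true)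
  | c :: cs, l :: L, false =>
    if c = '(' then 0 :: maskGo cs L true else l :: maskGo cs L false

lemma maskGo_ones : ∀ (cs : List Char) (b : Bool),
    maskGo cs (List.replicate cs.length (1 : Int)) b = altGo cs b := by
  intro cs
  induction cs with
  | nil => intro b; cases b <;> rfl
  | cons c cs ih =>
    intro b
    cases b <;> simp only [List.length_cons, List.replicate_succ, maskGo, altGo] <;>
      [skip; split] <;> simp [ih]

lemma maskGo_no_open : ∀ (cs : List Char) (L : List Int), '(' ∉ cs → maskGo cs L false = L := by
  intro cs
  induction cs with
  | nil => intro L _; rfl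
  | cons c cs ih =>
    intro L h
    cases L with
    | nil => rfl
    | cons l L =>
      simp only [List.mem_cons, not_or] at h
      simp [maskGo, Ne.symm h.1, ih L h.2]

lemma maskGo_append_clean : ∀ (a : List Char) (xs : List Int) (r : List Char) (ys : List Int),
    '(' ∉ a → ')' ∉ a → xs.length = a.length →
    maskGo (a ++ r) (xs ++ ys) false = xs ++ maskGo r ys false := by
  intro a
  induction a with
  | nil => intro xs r ys _ _ hlen; simp at hlen; simp [hlen]
  | cons c a ih =>
    intro xs r ys h1 h2 hlen
    simp only [List.mem_cons, not_or] at h1 h2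
    cases xs with
    | nil => simp at hlen
    | cons x xs =>
      simp only [List.length_cons] at hlen
      simp [maskGo, Ne.symm h1.1, ih xs r ys h1.2 h2.2 (by omega)]

lemma maskGo_inside_run : ∀ (b : List Char) (Lb : List Int) (d : List Char) (l2 : Int) (Ld : List Int),
    ')' ∉ b → Lb.length = b.length →
    maskGo (b ++ ')' :: d) (Lb ++ l2 :: Ld) true =
      List.replicate (b.length + 1) 0 ++ maskGo d Ld false := by
  intro b
  induction b with
  | nil => intro Lb d l2 Ld _ hlen; simp at hlen; simp [hlen, maskGo]
  | cons c b ih =>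
    intro Lb d l2 Ld h hlen
    simp only [List.mem_cons, not_or] at h
    cases Lb with
    | nil => simp at hlen
    | cons x Lb =>
      simp only [List.length_cons] at hlen
      simp [maskGo, Ne.symm h.1, ih Lb d l2 Ld h.2 (by omega), List.replicate_succ]

-- classify decomposition: a terminating input that still contains '(' splits as
-- a ++ '(' :: b ++ ')' :: d with a paren-free, b ')'-free, d again terminating.
lemma classify_inside_decomp : ∀ (r : List Char), aClassify r true = 0 →
    ∃ b d, r = b ++ ')' :: d ∧ ')' ∉ b ∧ aClassify d false = 0 := by
  intro r
  induction r with
  | nil => intro h; simp [aClassify] at h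
  | cons c r ih =>
    intro h
    by_cases hc : c = ')'
    · subst hc
      refine ⟨[], r, by simp, by simp, ?_⟩
      simpa [aClassify] using h
    · have h' : aClassify r true = 0 := by simpa [aClassify, hc] using h
      obtain ⟨b, d, hbd, hnb, hd⟩ := ih h'
      exact ⟨c :: b, d, by simp [hbd], by simp [Ne.symm hc, hnb], hd⟩

lemma classify_decomp : ∀ (cs : List Char), aClassify cs false = 0 → '(' ∈ cs →
    ∃ a b d, cs = a ++ '(' :: (b ++ ')' :: d) ∧ '(' ∉ a ∧ ')' ∉ a ∧ ')' ∉ b ∧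
      aClassify d false = 0 := by
  intro cs
  induction cs with
  | nil => intro _ h; simp at h
  | cons c cs ih =>
    intro h hmem
    by_cases hop : c = '('
    · subst hop
      have h' : aClassify cs true = 0 := by simpa [aClassify] using h
      obtain ⟨b, d, hbd, hnb, hd⟩ := classify_inside_decomp cs h'
      exact ⟨[], b, d, by simp [hbd], by simp, by simp, hnb, hd⟩
    · by_cases hcl : c = ')'
      · subst hcl
        have hnc : '(' ∈ cs := by
          rcases List.mem_cons.mp hmem with h' | h'
          · exact absurd h'.symm (by decide)
          · exact h'
        have hcon : cs.contains '(' = true := by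
          simpa using hnc
        simp [aClassify, hcon] at h
        exact absurd hnc h
      · have h' : aClassify cs false = 0 := by simpa [aClassify, hop, hcl] using h
        have hmem' : '(' ∈ cs := by
          rcases List.mem_cons.mp hmem with h'' | h''
          · exact absurd h''.symm hop
          · exact h''
        obtain ⟨a, b, d, hbd, ha1, ha2, hnb, hd⟩ := ih h' hmem'
        exact ⟨c :: a, b, d, by simp [hbd], by simp [Ne.symm hop, ha1],
          by simp [Ne.symm hcl, ha2], hnb, hd⟩

-- the pair-fold of the inner for-loop splits into its two components
lemma aFold_pair (f : List Int → Nat → List Int) (g : List Char → List Char) :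
    ∀ (r : List Nat) (L : List Int) (C : List Char),
      r.foldl (fun (p : List Int × List Char) i => (f p.1 i, g p.2)) (L, C) =
        (r.foldl f L, g^[r.length] C) := by
  intro r
  induction r with
  | nil => intro L C; rfl
  | cons i r ih =>
    intro L C
    simp [List.foldl_cons, ih, Function.iterate_succ_apply]

lemma iterate_of_idem {α : Type} (g : α → α) (C : α) (h : g (g C) = g C) :
    ∀ k, 1 ≤ k → g^[k] C = g C := by
  intro k
  induction k with
  | zero => omega
  | succ k ih =>
    intro _
    rcases Nat.eq_zero_or_pos k with hk | hk
    · subst hk; simp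
    · rw [Function.iterate_succ_apply', ih hk, h]

lemma set_append_len {α : Type} (v : α) : ∀ (u : List α) (x : α) (t : List α),
    (u ++ x :: t).set u.length v = u ++ v :: t := by
  intro u
  induction u with
  | nil => intro x t; rfl
  | cons y u ih => intro x t; simp [List.set, ih]

-- zeroing countlist[s..s+k-1] where the list decomposes as u ++ w ++ v with |u| = s, |w| = k
lemma setZero_decomp : ∀ (w u v : List Int),
    (List.range' u.length w.length).foldl (fun (l : List Int) i => l.set i 0) (u ++ (w ++ v)) =
      u ++ (List.replicate w.length 0 ++ v) := by
  intro w
  induction w with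
  | nil => intro u v; simp
  | cons x w ih =>
    intro u v
    rw [List.length_cons, List.range'_succ, List.foldl_cons]
    have h1 : (u ++ (x :: w ++ v)).set u.length 0 = (u ++ [0]) ++ (w ++ v) := by
      simpa using set_append_len 0 u x (w ++ v)
    rw [h1]
    have h2 := ih (u ++ [0]) v
    simp only [List.length_append, List.length_cons, List.length_nil] at h2 ⊢
    simpa [List.replicate_succ, Nat.add_comm] using h2

lemma splitList : ∀ (n : Nat) (L : List Int) (m : Nat), L.length = n + (1 + m) →
    ∃ u x v, L = u ++ x :: v ∧ u.length = n ∧ v.length = m := by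
  intro n
  induction n with
  | zero =>
    intro L m h
    cases L with
    | nil => exfalso; simp only [List.length_nil] at h; omega
    | cons x v =>
      refine ⟨[], x, v, rfl, rfl, ?_⟩
      simp only [List.length_cons] at h; omega
  | succ n ih =>
    intro L m h
    cases L with
    | nil => exfalso; simp only [List.length_nil] at h; omega
    | cons y L' =>
      obtain ⟨u, x, v, h1, h2, h3⟩ := ih L' m (by simp only [List.length_cons] at h; omega)
      exact ⟨y :: u, x, v, by simp [h1], by simp [h2], h3⟩

-- main loop invariant: a paren-free processed prefix, a terminating remainder
lemma aLoop_spec : ∀ (fuel : Nat) (pre cs : List Char) (Lp Lc : List Int),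
    '(' ∉ pre → ')' ∉ pre → aClassify cs false = 0 → cs.count '(' < fuel →
    Lp.length = pre.length → Lc.length = cs.length →
    aLoop fuel (pre ++ cs) (Lp ++ Lc) = Lp ++ maskGo cs Lc false := by
  intro fuel
  induction fuel with
  | zero => intro pre cs Lp Lc _ _ _ hcount _ _; omega
  | succ fuel ih =>
    intro pre cs Lp Lc hp1 hp2 hcls hcount hlp hlc
    by_cases hc : '(' ∈ cs
    · obtain ⟨a, b, d, hdec, ha1, ha2, hnb, hd⟩ := classify_decomp cs hcls hc
      subst hdec
      -- split Lc to match the shape of cs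
      obtain ⟨La, l1, rest, hLc, hLa, hrest⟩ :=
        splitList a.length Lc (b.length + 1 + d.length)
          (by simp at hlc ⊢; omega)
      obtain ⟨Lb, l2, Ld, hrest2, hLb, hLd⟩ :=
        splitList b.length rest d.length (by omega)
      subst hrest2; subst hLc
      have hcontains : ((pre ++ (a ++ '(' :: (b ++ ')' :: d))).contains '(') = true := by simp
      have hidx1 : PySem.List.index? (pre ++ (a ++ '(' :: (b ++ ')' :: d))) '(' =
          some (pre.length + a.length) := by
        rw [PySem.List.index?_eq_some_iff]
        exact ⟨pre ++ a, b ++ ')' :: d, by simp, by simp, by simp [hp1, ha1]⟩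
      have hidx2 : PySem.List.index? (pre ++ (a ++ '(' :: (b ++ ')' :: d))) ')' =
          some (pre.length + a.length + (1 + b.length)) := by
        rw [PySem.List.index?_eq_some_iff]
        refine ⟨pre ++ a ++ '(' :: b, d, by simp, by simp; omega, ?_⟩
        simp [hp2, ha2, hnb]
      rw [aLoop]
      rw [hcontains, if_pos rfl, hidx1, hidx2]
      have hk : pre.length + a.length + (1 + b.length) + 1 - (pre.length + a.length) =
          b.length + 2 := by omega
      simp only [hk]
      rw [aFold_pair (fun l i => l.set i 0)
        (fun C => C.take (pre.length + a.length) ++ List.replicate (b.length + 2) 'X' ++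
          C.drop (pre.length + a.length + (1 + b.length) + 1))]
      set g : List Char → List Char := fun C =>
        C.take (pre.length + a.length) ++ List.replicate (b.length + 2) 'X' ++
          C.drop (pre.length + a.length + (1 + b.length) + 1) with hgdef
      -- the masking function on lists of the right shape
      have hg : ∀ (t : List Char), t.length = b.length + 2 →
          g ((pre ++ a) ++ (t ++ d)) =
            (pre ++ a) ++ (List.replicate (b.length + 2) 'X' ++ d) := by
        intro t ht
        have e1 : ((pre ++ a) ++ (t ++ d)).take (pre.length + a.length) = pre ++ a := by
          rw [show pre.length + a.length = (pre ++ a).length by simp]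
          exact List.take_left ..
        have e2 : ((pre ++ a) ++ (t ++ d)).drop (pre.length + a.length + (1 + b.length) + 1) = d := by
          rw [show (pre ++ a) ++ (t ++ d) = ((pre ++ a) ++ t) ++ d by simp]
          rw [show pre.length + a.length + (1 + b.length) + 1 = ((pre ++ a) ++ t).length by
            simp [ht]; omega]
          exact List.drop_left ..
        rw [hgdef]
        simp only [e1, e2]
        simp
      have hC0 : pre ++ (a ++ '(' :: (b ++ ')' :: d)) =
          (pre ++ a) ++ (('(' :: (b ++ [')'])) ++ d) := by simp
      have h1 : g ((pre ++ a) ++ (('(' :: (b ++ [')'])) ++ d)) =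
          (pre ++ a) ++ (List.replicate (b.length + 2) 'X' ++ d) := hg _ (by simp)
      have h2 : g ((pre ++ a) ++ (List.replicate (b.length + 2) 'X' ++ d)) =
          (pre ++ a) ++ (List.replicate (b.length + 2) 'X' ++ d) := hg _ (by simp)
      have hiter : g^[(List.range' (pre.length + a.length) (b.length + 2)).length]
            (pre ++ (a ++ '(' :: (b ++ ')' :: d))) =
          (pre ++ a) ++ (List.replicate (b.length + 2) 'X' ++ d) := by
        rw [hC0, iterate_of_idem g _ (by rw [h1, h2]) _ (by simp [List.length_range']), h1]
      -- the zeroed countlist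
      have hzero : (List.range' (pre.length + a.length) (b.length + 2)).foldl
            (fun (l : List Int) i => l.set i 0) ((Lp ++ (La ++ l1 :: (Lb ++ l2 :: Ld)))) =
          (Lp ++ La) ++ (List.replicate (b.length + 2) 0 ++ Ld) := by
        have := setZero_decomp (l1 :: (Lb ++ [l2])) (Lp ++ La) Ld
        simp only [List.length_append, List.length_cons, List.length_nil, hlp, hLa, hLb] at this ⊢
        have harr : (Lp ++ La) ++ ((l1 :: (Lb ++ [l2])) ++ Ld) = Lp ++ (La ++ l1 :: (Lb ++ l2 :: Ld)) := by
          simp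
        rw [harr] at this
        have hlen2 : Lb.length + 1 + 1 = b.length + 2 := by omega
        simpa [hlen2, Nat.add_comm, Nat.add_assoc, Nat.add_left_comm] using this
      simp only [hiter, hzero]
      -- recursive call via ih
      have hcount' : d.count '(' < fuel := by
        have h1 : List.count '(' (a ++ '(' :: (b ++ ')' :: d)) =
            List.count '(' a + (List.count '(' b + (List.count '(' d + 1)) := by
          simp [List.count_append, List.count_cons]; omega
        rw [h1] at hcount
        omega
      have hrec := ih (pre ++ a ++ List.replicate (b.length + 2) 'X') d
        (Lp ++ La ++ List.replicate (b.length + 2) 0) Ld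
        (by simp [List.mem_replicate, ha1, hp1])
        (by simp [List.mem_replicate, ha2, hp2])
        hd hcount'
        (by simp [hlp, hLa])
        (by omega)
      simp only [List.append_assoc] at hrec ⊢
      rw [hrec]
      -- fold B's scan over the same decomposition
      rw [maskGo_append_clean a La _ (l1 :: (Lb ++ l2 :: Ld)) ha1 ha2 hLa]
      have hmg : maskGo ('(' :: (b ++ ')' :: d)) (l1 :: (Lb ++ l2 :: Ld)) false =
          0 :: maskGo (b ++ ')' :: d) (Lb ++ l2 :: Ld) true := by
        simp [maskGo]
      rw [hmg, maskGo_inside_run b Lb d l2 Ld hnb hLb]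
      simp [List.replicate_succ]
    · have hnc : ((pre ++ cs).contains '(') = false := by
        simpa [hp1] using hc
      rw [aLoop, hnc]
      simp [maskGo_no_open cs Lc hc]

-- ===== VERDICT (by name: the statement is the Claim_ definition above) =====
theorem setupcount_spec : Claim_equal_setupcount := by
  intro s _ hpre
  unfold Spec_setupcount setupcount setupcount_alt
  have h := aLoop_spec (s.toList.length + 1) [] s.toList [] (s.toList.map (fun _ => (1 : Int)))
    (by simp) (by simp) hpre
    (by have := List.count_le_length (l := s.toList) (a := '('); omega)
    (by simp) (by simp)
  simp only [List.nil_append] at h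
  rw [h, show s.toList.map (fun _ => (1 : Int)) = List.replicate s.toList.length 1 from by
    simp [List.map_const'], maskGo_ones]
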